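-- pv_equiv track=rewrite | github.com/SS-hj/coding_test | programmers/77885.py | solution
-- ===== SOURCE A (Python) =====
-- def solution(numbers):
--     answer = []
--     for number in numbers:
--         bin_number = '0'+format(number, 'b')
--         idx = bin_number.rfind('0')
--         bin_number = bin_number[:idx]+'1'+bin_number[idx+1:]
--         if number % 2 == 1:
--             bin_number = bin_number[:idx+1]+'0'+bin_number[idx+2:]
--         answer.append(int(bin_number, 2))
--     return answer
-- ===== SOURCE B (Python) =====
-- def solution(numbers):
--     answer = []
--     for number in numbers:
--         x, step = number + 1, 1
--         while x != 0 and x % 2 == 0: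
--             x //= 2
--             step *= 2
--         answer.append(number + (step + 1) // 2)
--     return answer
-- ===== Notes on version B (the rewrite author's own statement) =====
-- stated objective: alternative
-- what changed: Replaces the format/rfind/string-splicing pipeline by pure arithmetic: strip the trailing zero bits of n+1 with a halving loop (step becomes the lowest set bit of n+1) and append n + (step + 1) // 2; no strings anywhere.
-- outside the precondition, e.g. on solution([-1]): A returns [5], B returns [0]; on solution([-3]): A returns [11], B returns [-2]; on solution([-2]): A raises ValueError, B returns [-1]
import Mathlib
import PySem

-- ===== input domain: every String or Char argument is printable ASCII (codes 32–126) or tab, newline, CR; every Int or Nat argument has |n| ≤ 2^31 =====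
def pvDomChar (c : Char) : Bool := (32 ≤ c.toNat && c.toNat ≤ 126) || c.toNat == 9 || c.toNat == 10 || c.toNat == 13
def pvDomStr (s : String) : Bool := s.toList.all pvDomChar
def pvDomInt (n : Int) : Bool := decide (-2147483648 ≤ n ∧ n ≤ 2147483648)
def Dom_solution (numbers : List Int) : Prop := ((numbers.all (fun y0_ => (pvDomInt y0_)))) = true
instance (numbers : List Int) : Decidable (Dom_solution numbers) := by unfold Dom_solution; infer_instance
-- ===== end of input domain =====

-- B replaces A's format/rfind/string-splicing pipeline by pure arithmetic (a halving loop
-- isolates the lowest set bit of n+1); equivalence is proved for lists of nonnegative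
-- numbers (Pre_), the task's evident domain.


-- ===== PORT A =====
-- literal port of A: bin_number = '0'+format(number,'b'); idx = bin_number.rfind('0');
-- two slice-splices; int(bin_number, 2).  int(.,2) raising ValueError (none) is outside
-- Pre_solution; the .getD 0 there is never the claimed value.
def solution (numbers : List Int) : List Int :=
  numbers.foldl (fun answer number =>
    let binNumber : List Char := '0' :: PySem.Int.toBinChars number
    let idx : Int := PySem.Chars.rfind binNumber ['0']
    let binNumber : List Char :=
      PySem.Chars.slice binNumber none (some idx) ++ '1' :: PySem.Chars.slice binNumber (some (idx+1)) none
    let binNumber : List Char :=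
      if PySem.Int.mod number 2 = 1 then
        PySem.Chars.slice binNumber none (some (idx+1)) ++ '0' :: PySem.Chars.slice binNumber (some (idx+2)) none
      else binNumber
    answer ++ [(PySem.Int.ofCharsBase? binNumber 2).getD 0]) []

-- ===== PORT B =====
-- literal port of Source B: the while loop 'while x != 0 and x % 2 == 0: x //= 2; step *= 2'
def altLoop (x step : Int) : Int × Int :=
  if x ≠ 0 ∧ PySem.Int.mod x 2 = 0 then altLoop (PySem.Int.floordiv x 2) (step * 2) else (x, step)
termination_by x.natAbs
decreasing_by
  rename_i h
  have h2 : (2 : Int) ∣ x := (PySem.Int.mod_eq_zero_iff_dvd x 2).mp h.2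
  have h1 : x ≠ 0 := h.1
  rw [PySem.Int.floordiv_eq_ediv_of_pos (by omega : (0:Int) < 2)]
  omega

def solution_alt (numbers : List Int) : List Int :=
  numbers.foldl (fun answer number =>
    let p := altLoop (number + 1) 1
    answer ++ [number + PySem.Int.floordiv (p.2 + 1) 2]) []

-- ===== PRECONDITION & SPEC =====
-- Pre_ excludes lists with a negative element (the problem statement guarantees positive
-- numbers): there A raises ValueError whenever the binary digits of |n| contain a '0',
-- and on the remaining n = -(2^k - 1) it returns an accidental value obtained by splicing
-- over the '-' sign (e.g. [-1] ↦ [5]).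
def Pre_solution (numbers : List Int) : Prop := ∀ n ∈ numbers, 0 ≤ n
instance (numbers : List Int) : Decidable (Pre_solution numbers) := by unfold Pre_solution; infer_instance
def pvWitness_solution : List Int := [2, 7, 0]

def Spec_solution (numbers : List Int) (out : List Int) : Prop := out = solution_alt numbers
instance (numbers : List Int) (out : List Int) : Decidable (Spec_solution numbers out) := by unfold Spec_solution; infer_instance

-- ===== CLAIM (what is proved, stated in full; the proofs are below) =====
def Claim_equal_solution : Prop := ∀ (numbers : List Int), Dom_solution numbers → Pre_solution numbers → Spec_solution numbers (solution numbers)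

-- ===== LEMMAS AND PROOFS =====

-- value of a binary digit string (most significant first)
def bvStep (a : Nat) (c : Char) : Nat := a * 2 + (if c = '1' then 1 else 0)
def bv (l : List Char) : Nat := l.foldl bvStep 0

theorem bv_shift (l : List Char) (a : Nat) :
    l.foldl bvStep a = a * 2 ^ l.length + bv l := by
  induction l generalizing a with
  | nil => simp [bv]
  | cons c r IH =>
    simp only [List.foldl_cons, bv] at *
    rw [IH (bvStep a c), IH (bvStep 0 c)]
    simp only [bvStep, List.length_cons, pow_succ]
    split <;> ring

theorem bv_append (xs ys : List Char) :
    bv (xs ++ ys) = bv xs * 2 ^ ys.length + bv ys := by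
  simp only [bv, List.foldl_append]
  rw [bv_shift ys (xs.foldl bvStep 0)]
  rfl

theorem bv_replicate_one (t : Nat) : bv (List.replicate t '1') = 2 ^ t - 1 := by
  induction t with
  | zero => rfl
  | succ s IH =>
    rw [List.replicate_succ', bv_append, IH]
    simp only [bv, bvStep, List.length_singleton, List.foldl_cons, List.foldl_nil]
    have : 0 < 2 ^ s := Nat.two_pow_pos s
    simp
    ring_nf
    omega

theorem bv_cons_zero (l : List Char) : bv ('0' :: l) = bv l := by
  simp [bv, bvStep]

-- ---- faithful local copy of PySem's private int(s, base) parser (definitionally equal;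
-- ---- needed because the private helpers cannot be named) ----
def myDigitOk (b : Nat) (c : Char) : Bool :=
  match PySem.Int.digitVal? c with
  | some d => decide (d < b)
  | none => false

def myGo (b : Nat) : List Char → Bool → Nat → Option Nat
  | [], afterDigit, acc => if afterDigit = true then some acc else none
  | c :: rest, afterDigit, acc =>
    if myDigitOk b c = true then myGo b rest true (acc * b + (PySem.Int.digitVal? c).getD 0)
    else
      if c = '_' ∧ afterDigit = true then
        match rest with
        | d :: _ => if myDigitOk b d = true then myGo b rest false acc else none
        | [] => none
      else none

def myDigitsValB? (b : Nat) (ds : List Char) : Option Nat :=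
  match ds with
  | [] => none
  | cs => myGo b cs false 0

def myOfCharsBase? (s : List Char) (base : Int) : Option Int :=
  if ¬(base = 0 ∨ 2 ≤ base ∧ base ≤ 36) then none
  else
    have cs := (List.dropWhile PySem.Int.isIntSpace (List.dropWhile PySem.Int.isIntSpace s).reverse).reverse;
    match
      match cs with
      | '-' :: r => (true, r)
      | '+' :: r => (false, r)
      | r => (false, r) with
    | (neg, cs) =>
      have pfx :=
        match cs with
        | '0' :: c :: _ =>
          if c = 'b' ∨ c = 'B' then some 2
          else if c = 'o' ∨ c = 'O' then some 8 else if c = 'x' ∨ c = 'X' then some 16 else none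
        | _ => none;
      have usePfx :=
        match pfx with
        | some p => decide (base = 0 ∨ base.toNat = p)
        | none => false;
      have b := if usePfx = true then pfx.getD 10 else if base = 0 then 10 else base.toNat;
      have ds :=
        if usePfx = true then
          match List.drop 2 cs with
          | '_' :: d :: r => if myDigitOk b d = true then d :: r else '_' :: d :: r
          | r => r
        else cs;
      match myDigitsValB? b ds with
      | none => none
      | some n =>
        if base = 0 ∧ ¬usePfx = true ∧ n ≠ 0 ∧ ds.head? = some '0' then none else some (if neg = true then -↑n else ↑n)

theorem stripBin (l : List Char) (h : ∀ x ∈ l, x = '0' ∨ x = '1') :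
    List.dropWhile PySem.Int.isIntSpace l = l := by
  cases l with
  | nil => rfl
  | cons a t =>
    rcases h a (by simp) with ha | ha <;> subst ha <;>
      simp [PySem.Int.isIntSpace]

theorem parse_bin (c : Char) (r : List Char) (hc : c = '0' ∨ c = '1')
    (hr : ∀ x ∈ r, x = '0' ∨ x = '1') :
    PySem.Int.ofCharsBase? (c :: r) 2 = myOfCharsBase? (c :: r) 2 := by
  have hall : ∀ x ∈ c :: r, x = '0' ∨ x = '1' := by
    intro x hx; rcases List.mem_cons.mp hx with hx | hx
    · exact hx ▸ hc
    · exact hr x hx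
  have h1 : List.dropWhile PySem.Int.isIntSpace (c :: r) = c :: r := stripBin _ hall
  have h2 : List.dropWhile PySem.Int.isIntSpace ((c :: r).reverse) = (c :: r).reverse := by
    refine stripBin _ ?_; intro x hx; exact hall x (by simpa using (List.mem_reverse.mp hx))
  unfold PySem.Int.ofCharsBase? myOfCharsBase?
  rw [h1, h2, List.reverse_reverse]
  rcases hc with hc | hc <;> subst hc <;>
    [rcases r with _ | ⟨c2, r2⟩; skip] <;>
    [skip; rcases hr c2 (by simp) with hc2 | hc2; skip] <;>
    [skip; subst hc2; subst hc2; skip] <;> simp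
  case _ => rfl
  all_goals (congr 1 <;> try rfl)
  all_goals (conv_lhs => whnf)
  all_goals (conv_rhs => whnf)
  case _ =>
    generalize ((0 * 2 + (PySem.Int.digitVal? '0').getD 0) * 2 + (PySem.Int.digitVal? '0').getD 0 : Nat) = acc
    generalize (true : Bool) = af
    clear hr hall h1 h2
    induction r2 generalizing af acc with
    | nil => rfl
    | cons hd tl IH =>
      conv_lhs => whnf
      conv_rhs => whnf
      rw [← IH, ← IH]
      with_unfolding_all rfl
  case _ =>
    generalize ((0 * 2 + (PySem.Int.digitVal? '0').getD 0) * 2 + (PySem.Int.digitVal? '1').getD 0 : Nat) = acc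
    generalize (true : Bool) = af
    clear hr hall h1 h2
    induction r2 generalizing af acc with
    | nil => rfl
    | cons hd tl IH =>
      conv_lhs => whnf
      conv_rhs => whnf
      rw [← IH, ← IH]
      with_unfolding_all rfl
  case _ =>
    generalize (0 * 2 + (PySem.Int.digitVal? '1').getD 0 : Nat) = acc
    generalize (true : Bool) = af
    clear hr hall h1 h2
    induction r generalizing af acc with
    | nil => rfl
    | cons hd tl IH =>
      conv_lhs => whnf
      conv_rhs => whnf
      rw [← IH, ← IH]
      with_unfolding_all rfl

theorem myGo_step (c : Char) (rest : List Char) (af : Bool) (acc : Nat)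
    (hc : c = '0' ∨ c = '1') :
    myGo 2 (c :: rest) af acc = myGo 2 rest true (bvStep acc c) := by
  rcases hc with hc | hc <;> subst hc <;>
    simp [myGo, myDigitOk, PySem.Int.digitVal?, bvStep, Char.isDigit]

theorem myGo_bin (l : List Char) (acc : Nat) (h : ∀ x ∈ l, x = '0' ∨ x = '1') :
    myGo 2 l true acc = some (l.foldl bvStep acc) := by
  induction l generalizing acc with
  | nil => rfl
  | cons c r IH =>
    rw [myGo_step c r true acc (h c (by simp)), IH _ (fun x hx => h x (by simp [hx]))]
    rfl

theorem dv_bin (c : Char) (r : List Char) (hc : c = '0' ∨ c = '1')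
    (hr : ∀ x ∈ r, x = '0' ∨ x = '1') :
    myDigitsValB? 2 (c :: r) = some (bv (c :: r)) := by
  show myGo 2 (c :: r) false 0 = _
  rw [myGo_step _ _ _ _ hc, myGo_bin _ _ hr]
  rfl

theorem myParse_bin (c : Char) (r : List Char) (hc : c = '0' ∨ c = '1')
    (hr : ∀ x ∈ r, x = '0' ∨ x = '1') :
    myOfCharsBase? (c :: r) 2 = some ((bv (c :: r) : Nat) : Int) := by
  have hall : ∀ x ∈ c :: r, x = '0' ∨ x = '1' := by
    intro x hx; rcases List.mem_cons.mp hx with hx | hx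
    · exact hx ▸ hc
    · exact hr x hx
  have h1 : List.dropWhile PySem.Int.isIntSpace (c :: r) = c :: r := stripBin _ hall
  have h2 : List.dropWhile PySem.Int.isIntSpace ((c :: r).reverse) = (c :: r).reverse := by
    refine stripBin _ ?_; intro x hx; exact hall x (by simpa using (List.mem_reverse.mp hx))
  unfold myOfCharsBase?
  rw [h1, h2, List.reverse_reverse]
  rcases hc with hc | hc <;> subst hc <;>
    [rcases r with _ | ⟨c2, r2⟩; skip] <;>
    [skip; rcases hr c2 (by simp) with hc2 | hc2; skip] <;>
    [skip; subst hc2; subst hc2; skip] <;> simp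
  case inl.nil => rfl
  case inl.cons.inl => rw [dv_bin _ _ (Or.inl rfl) hr]
  case inl.cons.inr => rw [dv_bin _ _ (Or.inl rfl) hr]
  case inr => rw [dv_bin _ _ (Or.inr rfl) hr]

theorem parse_val (c : Char) (r : List Char) (hc : c = '0' ∨ c = '1')
    (hr : ∀ x ∈ r, x = '0' ∨ x = '1') :
    PySem.Int.ofCharsBase? (c :: r) 2 = some ((bv (c :: r) : Nat) : Int) := by
  rw [parse_bin c r hc hr, myParse_bin c r hc hr]

-- binary digit list of a natural number (format(m, 'b'))
def natBits (m : Nat) : List Char :=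
  if m < 2 then [if m = 1 then '1' else '0']
  else natBits (m / 2) ++ [if m % 2 = 1 then '1' else '0']
decreasing_by exact Nat.div_lt_self (by omega) (by omega)

theorem toDigitsCore_eq (fuel : Nat) : ∀ m ds, m < fuel →
    Nat.toDigitsCore 2 fuel m ds = natBits m ++ ds := by
  induction fuel with
  | zero => intro m ds h; omega
  | succ f IH =>
    intro m ds h
    rw [Nat.toDigitsCore]
    by_cases hm : m < 2
    · have : m / 2 = 0 := by omega
      rw [natBits]
      simp only [this, if_pos hm]
      interval_cases m <;> rfl
    · have h2 : ¬ (m / 2 = 0) := by omega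
      rw [natBits]
      simp only [if_neg hm, if_neg h2]
      rw [IH (m / 2) _ (by omega)]
      have : (m % 2).digitChar = (if m % 2 = 1 then '1' else '0') := by
        rcases Nat.mod_two_eq_zero_or_one m with h | h <;> rw [h] <;> rfl
      rw [this, List.append_assoc]
      rfl

theorem toBinChars_eq (N : Nat) : PySem.Int.toBinChars (N : Int) = natBits N := by
  unfold PySem.Int.toBinChars
  rw [if_neg (by omega)]
  show Nat.toDigits 2 (Int.toNat N) = natBits N
  rw [Int.toNat_natCast, Nat.toDigits]
  rw [toDigitsCore_eq (N + 1) N [] (by omega), List.append_nil]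

theorem natBits_binary (m : Nat) : ∀ x ∈ natBits m, x = '0' ∨ x = '1' := by
  induction m using natBits.induct with
  | case1 m hm =>
    rw [natBits, if_pos hm]
    intro x hx
    simp at hx
    subst hx
    split <;> simp
  | case2 m hm IH =>
    rw [natBits, if_neg hm]
    intro x hx
    rcases List.mem_append.mp hx with hx | hx
    · exact IH x hx
    · simp at hx; subst hx; split <;> simp

theorem bv_natBits (m : Nat) : bv (natBits m) = m := by
  induction m using natBits.induct with
  | case1 m hm =>
    rw [natBits, if_pos hm]
    interval_cases m <;> rfl
  | case2 m hm IH =>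
    rw [natBits, if_neg hm, bv_append, IH]
    have hb : bv [if m % 2 = 1 then '1' else '0'] = m % 2 := by
      rcases Nat.mod_two_eq_zero_or_one m with h | h <;> rw [h] <;> rfl
    rw [hb]
    simp
    omega

theorem natBits_ones (t : Nat) (h : 1 ≤ t) :
    natBits (2 ^ t - 1) = List.replicate t '1' := by
  induction t with
  | zero => omega
  | succ s IH =>
    by_cases hs : s = 0
    · subst hs
      show natBits (2 ^ 1 - 1) = List.replicate 1 '1'
      norm_num
      rw [natBits]
      norm_num
    · have hs1 : 1 ≤ s := by omega
      have h2 : 2 ^ (s + 1) - 1 = 2 * (2 ^ s - 1) + 1 := by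
        have : 0 < 2 ^ s := Nat.two_pow_pos s
        rw [pow_succ]; omega
      rw [natBits]
      have hbig : ¬ (2 ^ (s + 1) - 1 < 2) := by
        have : 4 ≤ 2 ^ (s + 1) := by
          calc (4 : Nat) = 2 ^ 2 := rfl
          _ ≤ 2 ^ (s + 1) := Nat.pow_le_pow_right (by omega) (by omega)
        omega
      rw [if_neg hbig]
      have hdiv : (2 ^ (s + 1) - 1) / 2 = 2 ^ s - 1 := by omega
      have hmod : (2 ^ (s + 1) - 1) % 2 = 1 := by omega
      rw [hdiv, hmod, IH hs1, if_pos rfl, ← List.replicate_succ']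

theorem natBits_split (t : Nat) : ∀ q, 1 ≤ q →
    natBits (q * 2 ^ (t + 1) + 2 ^ t - 1) = natBits q ++ '0' :: List.replicate t '1' := by
  induction t with
  | zero =>
    intro q hq
    have h1 : q * 2 ^ (0 + 1) + 2 ^ 0 - 1 = 2 * q := by
      simp only [pow_zero]; omega
    have hb0 : ¬ (2 * q < 2) := by omega
    rw [h1, natBits, if_neg hb0]
    have hd : 2 * q / 2 = q := by omega
    have hm : 2 * q % 2 = 0 := by omega
    rw [hd, hm]
    simp
  | succ s IH =>
    intro q hq
    have hpos : 0 < 2 ^ s := Nat.two_pow_pos s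
    have hN : q * 2 ^ (s + 1 + 1) + 2 ^ (s + 1) - 1
        = 2 * (q * 2 ^ (s + 1) + 2 ^ s - 1) + 1 := by
      have e1 : q * 2 ^ (s + 1 + 1) = 2 * (q * 2 ^ (s + 1)) := by ring
      have e2 : 2 ^ (s + 1) = 2 * 2 ^ s := by ring
      omega
    have hA : 0 < q * 2 ^ (s + 1) := Nat.mul_pos hq (Nat.two_pow_pos _)
    have hb1 : ¬ (2 * (q * 2 ^ (s + 1) + 2 ^ s - 1) + 1 < 2) := by omega
    rw [hN, natBits, if_neg hb1]
    have hd : (2 * (q * 2 ^ (s + 1) + 2 ^ s - 1) + 1) / 2 = q * 2 ^ (s + 1) + 2 ^ s - 1 := by omega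
    have hm : (2 * (q * 2 ^ (s + 1) + 2 ^ s - 1) + 1) % 2 = 1 := by omega
    rw [hd, hm, IH q hq, if_pos rfl, List.replicate_succ']
    simp only [List.append_assoc, List.cons_append]

-- rfind: the go loop returns the largest index holding '0'
theorem prefix_zero (l : List Char) :
    (['0'].isPrefixOf l = true) ↔ l.head? = some '0' := by
  cases l with
  | nil => simp [List.isPrefixOf]
  | cons c r =>
    simp only [List.isPrefixOf, List.head?_cons, Option.some.injEq, Bool.and_true,
      beq_iff_eq]
    exact eq_comm

theorem rfind_go_spec (s : List Char) (i : Nat) (hi : s[i]? = some '0') :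
    ∀ k, i ≤ k → (∀ j, i < j → j ≤ k → s[j]? ≠ some '0') →
    PySem.Chars.rfind.go s ['0'] k = (i : Int) := by
  intro k
  induction k with
  | zero =>
    intro hik _
    have h0 : i = 0 := by omega
    subst h0
    have hpre : ['0'].isPrefixOf s = true := by
      rw [prefix_zero]
      cases s with
      | nil => simp at hi
      | cons c r => simpa using hi
    rw [PySem.Chars.rfind.go, if_pos hpre]
    simp
  | succ k IH =>
    intro hik hab
    by_cases hcase : i = k + 1
    · subst hcase
      have hpre : ['0'].isPrefixOf (List.drop (k + 1) s) = true := by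
        rw [prefix_zero, List.head?_drop]
        exact hi
      rw [PySem.Chars.rfind.go, if_pos hpre]
    · have hpre : ¬ ['0'].isPrefixOf (List.drop (k + 1) s) = true := by
        rw [prefix_zero, List.head?_drop]
        exact hab (k + 1) (by omega) (by omega)
      rw [PySem.Chars.rfind.go, if_neg hpre]
      exact IH (by omega) (fun j h1 h2 => hab j h1 (by omega))

theorem rfind_split (P : List Char) (t : Nat) :
    PySem.Chars.rfind (P ++ '0' :: List.replicate t '1') ['0'] = (P.length : Int) := by
  have hi : (P ++ '0' :: List.replicate t '1')[P.length]? = some '0' := by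
    rw [List.getElem?_append_right (by omega)]
    simp
  unfold PySem.Chars.rfind
  refine rfind_go_spec _ _ hi _ (by simp) ?_
  intro j h1 h2
  rw [List.getElem?_append_right (by omega)]
  have h3 : j - P.length = (j - P.length - 1) + 1 := by omega
  rw [h3]
  simp only [List.getElem?_cons_succ, List.getElem?_replicate]
  split <;> simp

-- B's loop on (2q+1)·2^t
theorem altLoop_spec (t : Nat) : ∀ (q : Nat) (s : Int),
    altLoop (((2 * q + 1) * 2 ^ t : Nat) : Int) s = (((2 * q + 1 : Nat) : Int), s * 2 ^ t) := by
  induction t with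
  | zero =>
    intro q s
    have h1 : ((2 * q + 1) * 2 ^ 0 : Nat) = 2 * q + 1 := by ring
    rw [h1, altLoop, if_neg ?_]
    · simp
    · rintro ⟨-, h2⟩
      rw [PySem.Int.mod_eq_emod_of_pos (by omega)] at h2
      omega
  | succ k IH =>
    intro q s
    have hsplit : ((2 * q + 1) * 2 ^ (k + 1) : Nat) = ((2 * q + 1) * 2 ^ k) * 2 := by
      rw [pow_succ, mul_assoc]
    have hcond : (((2 * q + 1) * 2 ^ (k + 1) : Nat) : Int) ≠ 0 ∧
        PySem.Int.mod (((2 * q + 1) * 2 ^ (k + 1) : Nat) : Int) 2 = 0 := by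
      constructor
      · have : 0 < ((2 * q + 1) * 2 ^ (k + 1) : Nat) := by positivity
        omega
      · rw [PySem.Int.mod_eq_emod_of_pos (by omega), hsplit]
        omega
    rw [altLoop, if_pos hcond]
    have hd : PySem.Int.floordiv (((2 * q + 1) * 2 ^ (k + 1) : Nat) : Int) 2
        = (((2 * q + 1) * 2 ^ k : Nat) : Int) := by
      rw [PySem.Int.floordiv_eq_ediv_of_pos (show (0:Int) < 2 by omega), hsplit]
      push_cast
      exact Int.mul_ediv_cancel _ (by omega)
    rw [hd, IH q (s * 2)]
    simp only [Prod.mk.injEq, true_and]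
    ring

-- helper views of the two element computations (defeq to the foldl bodies)
def s0El (number : Int) : List Char := '0' :: PySem.Int.toBinChars number
def idx0El (number : Int) : Int := PySem.Chars.rfind (s0El number) ['0']
def s1El (number : Int) : List Char :=
  PySem.Chars.slice (s0El number) none (some (idx0El number)) ++
    '1' :: PySem.Chars.slice (s0El number) (some (idx0El number + 1)) none

def aElem (number : Int) : Int :=
  (PySem.Int.ofCharsBase?
    (if PySem.Int.mod number 2 = 1 then
      PySem.Chars.slice (s1El number) none (some (idx0El number + 1)) ++
        '0' :: PySem.Chars.slice (s1El number) (some (idx0El number + 2)) none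
    else s1El number) 2).getD 0

def bElem (number : Int) : Int :=
  number + PySem.Int.floordiv ((altLoop (number + 1) 1).2 + 1) 2

theorem parse_val_ne (l : List Char) (hne : l ≠ []) (hbin : ∀ x ∈ l, x = '0' ∨ x = '1') :
    PySem.Int.ofCharsBase? l 2 = some ((bv l : Nat) : Int) := by
  cases l with
  | nil => exact absurd rfl hne
  | cons c r => exact parse_val c r (hbin c (by simp)) (fun x hx => hbin x (by simp [hx]))

theorem slice_take (l : List Char) (k : Nat) :
    PySem.Chars.slice l none (some (k : Int)) = List.take k l := by
  simp only [PySem.Chars.slice_eq_listSlice]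
  rw [PySem.List.slice_to _ (by positivity)]
  simp

theorem slice_drop (l : List Char) (k : Nat) :
    PySem.Chars.slice l (some (k : Int)) none = List.drop k l := by
  simp only [PySem.Chars.slice_eq_listSlice]
  rw [PySem.List.slice_from _ (by positivity)]
  simp

-- the elementwise equality
theorem elem_eq (n : Int) (hn : 0 ≤ n) : aElem n = bElem n := by
  obtain ⟨N, rfl⟩ : ∃ N : Nat, n = (N : Int) := ⟨n.toNat, (Int.toNat_of_nonneg hn).symm⟩
  obtain ⟨t, m, hm2, hNm⟩ := Nat.exists_eq_pow_mul_and_not_dvd (Nat.succ_ne_zero N) 2 (by norm_num)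
  obtain ⟨q, rfl⟩ : ∃ q, m = 2 * q + 1 := ⟨m / 2, by omega⟩
  have hN1 : N + 1 = (2 * q + 1) * 2 ^ t := by
    rw [Nat.succ_eq_add_one] at hNm
    rw [hNm]; ring
  have hB : ((N : Int) + 1) = (((2 * q + 1) * 2 ^ t : Nat) : Int) := by
    rw [← hN1]; push_cast; ring
  obtain ⟨P, hP, hbvP, hPbin⟩ :
      ∃ P : List Char, '0' :: natBits N = P ++ '0' :: List.replicate t '1' ∧
        bv P = q ∧ (∀ x ∈ P, x = '0' ∨ x = '1') := by
    rcases Nat.eq_zero_or_pos q with hq | hq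
    · subst hq
      rcases Nat.eq_zero_or_pos t with ht | ht
      · subst ht
        have hN0 : N = 0 := by
          have h : (2 * 0 + 1) * 2 ^ 0 = 1 := by norm_num
          omega
        subst hN0
        refine ⟨['0'], ?_, rfl, ?_⟩
        · rw [natBits]
          norm_num
        · intro x hx; simp at hx; subst hx; exact Or.inl rfl
      · have hNt : N = 2 ^ t - 1 := by
          have h : (2 * 0 + 1) * 2 ^ t = 2 ^ t := by ring
          omega
        refine ⟨[], ?_, rfl, by simp⟩
        rw [hNt, natBits_ones t ht]
        simp
    · have hp : 0 < 2 ^ t := Nat.two_pow_pos t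
      have hNs : N = q * 2 ^ (t + 1) + 2 ^ t - 1 := by
        have e1 : q * 2 ^ (t + 1) = 2 * (q * 2 ^ t) := by ring
        have e2 : (2 * q + 1) * 2 ^ t = 2 * (q * 2 ^ t) + 2 ^ t := by ring
        omega
      refine ⟨'0' :: natBits q, ?_, by rw [bv_cons_zero, bv_natBits], ?_⟩
      · rw [hNs, natBits_split t q hq]
        simp
      · intro x hx
        rcases List.mem_cons.mp hx with hx | hx
        · exact Or.inl hx
        · exact natBits_binary q x hx
  have h0 : s0El (N : Int) = P ++ '0' :: List.replicate t '1' := by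
    unfold s0El
    rw [toBinChars_eq]
    exact hP
  have hidx : idx0El (N : Int) = (P.length : Int) := by
    unfold idx0El
    rw [h0, rfind_split]
  have h1 : s1El (N : Int) = P ++ '1' :: List.replicate t '1' := by
    unfold s1El
    have hdrop : List.drop (P.length + 1) (P ++ '0' :: List.replicate t '1')
        = List.replicate t '1' := by
      simpa using
        (List.drop_length_add_append 1 :
          List.drop (P.length + 1) (P ++ '0' :: List.replicate t '1') = _)
    rw [h0, hidx, show ((P.length : Int) + 1) = ((P.length + 1 : Nat) : Int) by push_cast; ring,
      slice_take, slice_drop, List.take_left, hdrop]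
  have hbin1 : ∀ x ∈ P ++ '1' :: List.replicate t '1', x = '0' ∨ x = '1' := by
    intro x hx
    rcases List.mem_append.mp hx with hx | hx
    · exact hPbin x hx
    · rcases List.mem_cons.mp hx with hx | hx
      · exact Or.inr hx
      · exact Or.inr (List.eq_of_mem_replicate hx)
  have hbvP1 : bv (P ++ ['1']) = 2 * q + 1 := by
    rw [bv_append, hbvP]
    show q * 2 ^ 1 + bv ['1'] = 2 * q + 1
    have h : bv ['1'] = 1 := rfl
    rw [h]
    ring
  unfold aElem bElem
  rw [h1, hB, hidx]
  rcases Nat.eq_zero_or_pos t with ht | ht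
  · subst ht
    have hN2q : N = 2 * q := by
      have h : (2 * q + 1) * 2 ^ 0 = 2 * q + 1 := by ring
      omega
    have hmod : ¬ PySem.Int.mod (N : Int) 2 = 1 := by
      rw [PySem.Int.mod_eq_emod_of_pos (by omega)]
      omega
    rw [if_neg hmod, altLoop_spec 0 q 1]
    have hPP : P ++ '1' :: List.replicate 0 '1' = P ++ ['1'] := rfl
    rw [hPP, parse_val_ne _ (by simp) (by rw [← hPP]; exact hbin1), hbvP1]
    simp only [Option.getD_some]
    have h2 : ((1 : Int) * 2 ^ 0 + 1) = 2 := by norm_num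
    rw [h2, show PySem.Int.floordiv 2 2 = 1 from by decide]
    push_cast
    omega
  · obtain ⟨s, rfl⟩ : ∃ s, t = s + 1 := ⟨t - 1, by omega⟩
    have hp : 0 < 2 ^ s := Nat.two_pow_pos s
    have hNodd : N % 2 = 1 := by
      have e : (2 * q + 1) * 2 ^ (s + 1) = 2 * ((2 * q + 1) * 2 ^ s) := by ring
      have hp2 : 0 < (2 * q + 1) * 2 ^ s := by positivity
      omega
    have hmod : PySem.Int.mod (N : Int) 2 = 1 := by
      rw [PySem.Int.mod_eq_emod_of_pos (by omega)]
      omega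
    rw [if_pos hmod, altLoop_spec (s + 1) q 1]
    have hrep : List.replicate (s + 1) '1' = '1' :: List.replicate s '1' := rfl
    have htake : PySem.Chars.slice (P ++ '1' :: List.replicate (s + 1) '1') none
        (some ((P.length : Int) + 1)) = P ++ ['1'] := by
      rw [show ((P.length : Int) + 1) = ((P.length + 1 : Nat) : Int) by push_cast; ring,
        slice_take]
      simpa using
        (List.take_length_add_append 1 :
          List.take (P.length + 1) (P ++ '1' :: List.replicate (s + 1) '1') = _)
    have hdrop2 : PySem.Chars.slice (P ++ '1' :: List.replicate (s + 1) '1')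
        (some ((P.length : Int) + 2)) none = List.replicate s '1' := by
      rw [show ((P.length : Int) + 2) = ((P.length + 2 : Nat) : Int) by push_cast; ring,
        slice_drop]
      have h := (List.drop_length_add_append 2 :
        List.drop (P.length + 2) (P ++ '1' :: List.replicate (s + 1) '1') = _)
      simpa [List.replicate_succ] using h
    rw [htake, hdrop2]
    have hbin2 : ∀ x ∈ (P ++ ['1']) ++ '0' :: List.replicate s '1', x = '0' ∨ x = '1' := by
      intro x hx
      rcases List.mem_append.mp hx with hx | hx
      · rcases List.mem_append.mp hx with hx | hx
        · exact hPbin x hx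
        · simp at hx; subst hx; exact Or.inr rfl
      · rcases List.mem_cons.mp hx with hx | hx
        · exact Or.inl hx
        · exact Or.inr (List.eq_of_mem_replicate hx)
    rw [parse_val_ne _ (by simp) hbin2]
    have hbv2 : bv ((P ++ ['1']) ++ '0' :: List.replicate s '1') = N + 2 ^ s := by
      rw [bv_append, hbvP1, bv_cons_zero, bv_replicate_one]
      have hlen : ('0' :: List.replicate s '1').length = s + 1 := by simp
      rw [hlen]
      have e4 : (2 * q + 1) * 2 ^ (s + 1) = 2 * ((2 * q + 1) * 2 ^ s) := by ring
      have e5 : (2 * q + 1) * 2 ^ (s + 1) = (2 * q + 1) * 2 ^ (s + 1) := rfl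
      have e6 : 2 ^ (s + 1) = 2 * 2 ^ s := by ring
      omega
    rw [hbv2]
    simp only [Option.getD_some]
    have hfd : PySem.Int.floordiv ((1 : Int) * 2 ^ (s + 1) + 1) 2 = 2 ^ s := by
      rw [PySem.Int.floordiv_eq_ediv_of_pos (show (0:Int) < 2 by omega)]
      have e : ((1 : Int) * 2 ^ (s + 1) + 1) = 2 ^ s * 2 + 1 := by ring
      rw [e]
      have hA : 0 ≤ (2 : Int) ^ s := by positivity
      omega
    rw [hfd]
    push_cast
    ring

-- ===== VERDICT (by name: the statement is the Claim_ definition above) =====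
theorem solution_spec : Claim_equal_solution := by
  intro numbers _ hpre
  unfold Spec_solution
  have ha : solution numbers = numbers.map aElem := by
    rw [show solution numbers
        = numbers.foldl (fun acc x => acc ++ [aElem x]) [] from rfl,
      PySem.List.foldl_append_singleton_eq_map]
    simp
  have hb : solution_alt numbers = numbers.map bElem := by
    rw [show solution_alt numbers
        = numbers.foldl (fun acc x => acc ++ [bElem x]) [] from rfl,
      PySem.List.foldl_append_singleton_eq_map]
    simp
  rw [ha, hb]
  exact List.map_congr_left (fun n hx => elem_eq n (hpre n hx))
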